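-- pv_equiv track=rewrite | github.com/AmshuBelbase/R2 | Autonomous/Mechanisms/mechanisms_main_color.py | detect_color
-- ===== SOURCE A (Python) =====
-- def detect_color(counts_history):
--     """ Determine the color based on the largest value being consistent for 3 consecutive readings """
--     #p_max = all((counts[1] > counts[2] and counts[1] > counts[3]) and counts[2] > counts[3] for counts in counts_history)
--     p_max = False
--     b_max = False
--     r_max = False
--     g_max = False
--     for counts in counts_history:
--         if (counts[1] > counts[2] and counts[1] > counts[3] and counts[3] > counts[2]):
--             #if(counts[3] > counts[2]):
--                 p_max=True
--         elif (counts[1] > counts[2] and counts[1] > counts[3]):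
--             r_max=True
--         elif (counts[2] > counts[1] and counts[2] > counts[3]):
--             g_max=True
--         elif (counts[3] > counts[2] and counts[3] > counts[1]):
--             b_max=True
--
--     '''
--     r_max = all(counts[1] > counts[2] and counts[1] > counts[3] for counts in counts_history)
--     g_max = all(counts[2] > counts[1] and counts[2] > counts[3] for counts in counts_history)
--     b_max = all(counts[3] > counts[1] and counts[3] > counts[2] for counts in counts_history)
--     '''
--
--
--
--
--     if p_max:
--         return "Purple"
--     elif r_max:
--         return "Red"
--     elif g_max:
--         return "-"
--     elif b_max:
--         return "Blue"
--     else: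
--         return "-"
-- ===== SOURCE B (Python) =====
-- def detect_color(counts_history):
--     """ Determine the color based on the largest value being consistent for 3 consecutive readings """
--     p_max = any(c[1] > c[2] and c[1] > c[3] and c[3] > c[2] for c in counts_history)
--     r_max = any(c[1] > c[2] and c[1] > c[3] and c[3] <= c[2] for c in counts_history)
--     g_max = any(c[2] > c[1] and c[2] > c[3] for c in counts_history)
--     b_max = any(c[3] > c[2] and c[3] > c[1] for c in counts_history)
--     if p_max:
--         return "Purple"
--     elif r_max:
--         return "Red"
--     elif g_max:
--         return "-"
--     elif b_max:
--         return "Blue"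
--     else:
--         return "-"
-- ===== Notes on version B (the rewrite author's own statement) =====
-- stated objective: idiomatic
-- what changed: Replaces the single stateful if/elif loop over four mutable flags by four independent any()-over-generator passes, folding the elif exclusivity into the Red predicate (c[3]<=c[2]); the priority return chain is kept.
import Mathlib
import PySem

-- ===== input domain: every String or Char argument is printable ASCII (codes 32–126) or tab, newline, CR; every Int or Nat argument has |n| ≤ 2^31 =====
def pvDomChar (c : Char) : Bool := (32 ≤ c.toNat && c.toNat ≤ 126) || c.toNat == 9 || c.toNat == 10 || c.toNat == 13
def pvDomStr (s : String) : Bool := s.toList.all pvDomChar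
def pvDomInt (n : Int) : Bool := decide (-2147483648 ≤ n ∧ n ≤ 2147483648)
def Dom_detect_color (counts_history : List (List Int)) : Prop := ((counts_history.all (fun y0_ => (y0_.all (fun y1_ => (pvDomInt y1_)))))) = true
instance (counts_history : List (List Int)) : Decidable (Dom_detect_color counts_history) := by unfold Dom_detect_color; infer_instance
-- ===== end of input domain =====

-- ===== PORT A =====
-- B replaces A's single stateful if/elif loop over four mutable flags by four
-- independent any-passes (idiomatic decomposition; same O(n) cost).
-- A's loop, carried flags in Python declaration order (p, b, r, g).
def aLoop : List (List Int) → Bool → Bool → Bool → Bool → Bool × Bool × Bool × Bool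
  | [], p, b, r, g => (p, b, r, g)
  | c :: t, p, b, r, g =>
    let c1 := PySem.List.pyGetD c 1 0
    let c2 := PySem.List.pyGetD c 2 0
    let c3 := PySem.List.pyGetD c 3 0
    if c1 > c2 ∧ c1 > c3 ∧ c3 > c2 then aLoop t true b r g
    else if c1 > c2 ∧ c1 > c3 then aLoop t p b true g
    else if c2 > c1 ∧ c2 > c3 then aLoop t p b r true
    else if c3 > c2 ∧ c3 > c1 then aLoop t p true r g
    else aLoop t p b r g

def detect_color (counts_history : List (List Int)) : String :=
  match aLoop counts_history false false false false with
  | (p, b, r, g) =>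
    if p then "Purple"
    else if r then "Red"
    else if g then "-"
    else if b then "Blue"
    else "-"

-- ===== PORT B =====
def pPred (c : List Int) : Bool :=
  PySem.List.pyGetD c 1 0 > PySem.List.pyGetD c 2 0 ∧
  PySem.List.pyGetD c 1 0 > PySem.List.pyGetD c 3 0 ∧
  PySem.List.pyGetD c 3 0 > PySem.List.pyGetD c 2 0

def rPred (c : List Int) : Bool :=
  PySem.List.pyGetD c 1 0 > PySem.List.pyGetD c 2 0 ∧
  PySem.List.pyGetD c 1 0 > PySem.List.pyGetD c 3 0 ∧
  PySem.List.pyGetD c 3 0 ≤ PySem.List.pyGetD c 2 0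

def gPred (c : List Int) : Bool :=
  PySem.List.pyGetD c 2 0 > PySem.List.pyGetD c 1 0 ∧
  PySem.List.pyGetD c 2 0 > PySem.List.pyGetD c 3 0

def bPred (c : List Int) : Bool :=
  PySem.List.pyGetD c 3 0 > PySem.List.pyGetD c 2 0 ∧
  PySem.List.pyGetD c 3 0 > PySem.List.pyGetD c 1 0

def detect_color_alt (counts_history : List (List Int)) : String :=
  if counts_history.any pPred then "Purple"
  else if counts_history.any rPred then "Red"
  else if counts_history.any gPred then "-"
  else if counts_history.any bPred then "Blue"
  else "-"

-- ===== PRECONDITION & SPEC =====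
-- A indexes counts[1], counts[2], counts[3] in every reachable branch, so it
-- raises IndexError exactly when some row has fewer than 4 entries.
def Pre_detect_color (counts_history : List (List Int)) : Prop :=
  ∀ c ∈ counts_history, 4 ≤ c.length
instance (counts_history : List (List Int)) : Decidable (Pre_detect_color counts_history) := by
  unfold Pre_detect_color; infer_instance
def pvWitness_detect_color : List (List Int) := [[0, 3, 1, 2], [5, 1, 2, 2]]
def Spec_detect_color (counts_history : List (List Int)) (out : String) : Prop := out = detect_color_alt counts_history
instance (counts_history : List (List Int)) (out : String) : Decidable (Spec_detect_color counts_history out) := by unfold Spec_detect_color; infer_instance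

-- ===== CLAIM (what is proved, stated in full; the proofs are below) =====
def Claim_equal_detect_color : Prop := ∀ (counts_history : List (List Int)), Dom_detect_color counts_history → Pre_detect_color counts_history → Spec_detect_color counts_history (detect_color counts_history)

-- ===== LEMMAS AND PROOFS =====

theorem aLoop_eq (h : List (List Int)) : ∀ p b r g,
    aLoop h p b r g = (p || h.any pPred, b || h.any bPred, r || h.any rPred, g || h.any gPred) := by
  induction h with
  | nil => simp [aLoop]
  | cons c t ih =>
    intro p b r g
    simp only [aLoop, List.any_cons]
    set c1 := PySem.List.pyGetD c 1 0 with hc1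
    set c2 := PySem.List.pyGetD c 2 0 with hc2
    set c3 := PySem.List.pyGetD c 3 0 with hc3
    have hp : pPred c = decide (c1 > c2 ∧ c1 > c3 ∧ c3 > c2) := by
      simp [pPred, hc1, hc2, hc3]
    have hr : rPred c = decide (c1 > c2 ∧ c1 > c3 ∧ c3 ≤ c2) := by
      simp [rPred, hc1, hc2, hc3]
    have hg : gPred c = decide (c2 > c1 ∧ c2 > c3) := by
      simp [gPred, hc1, hc2, hc3]
    have hb : bPred c = decide (c3 > c2 ∧ c3 > c1) := by
      simp [bPred, hc1, hc2, hc3]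
    split_ifs with h1 h2 h3 h4
    · have e1 : pPred c = true := by rw [hp]; simp only [decide_eq_true_eq]; omega
      have e2 : rPred c = false := by
        rw [hr]; simp only [decide_eq_false_iff_not]; omega
      have e3 : gPred c = false := by
        rw [hg]; simp only [decide_eq_false_iff_not]; omega
      have e4 : bPred c = false := by
        rw [hb]; simp only [decide_eq_false_iff_not]; omega
      rw [ih]; simp [e1, e2, e3, e4]
    · have e1 : pPred c = false := by
        rw [hp]; simp only [decide_eq_false_iff_not]; exact h1
      have e2 : rPred c = true := by
        rw [hr]; simp only [decide_eq_true_eq]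
        refine ⟨h2.1, h2.2, ?_⟩; by_contra hx; exact h1 ⟨h2.1, h2.2, by omega⟩
      have e3 : gPred c = false := by
        rw [hg]; simp only [decide_eq_false_iff_not]; omega
      have e4 : bPred c = false := by
        rw [hb]; simp only [decide_eq_false_iff_not]; omega
      rw [ih]; simp [e1, e2, e3, e4]
    · have e1 : pPred c = false := by
        rw [hp]; simp only [decide_eq_false_iff_not]; omega
      have e2 : rPred c = false := by
        rw [hr]; simp only [decide_eq_false_iff_not]; omega
      have e3 : gPred c = true := by rw [hg]; simp only [decide_eq_true_eq]; omega
      have e4 : bPred c = false := by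
        rw [hb]; simp only [decide_eq_false_iff_not]; omega
      rw [ih]; simp [e1, e2, e3, e4]
    · have e1 : pPred c = false := by
        rw [hp]; simp only [decide_eq_false_iff_not]; omega
      have e2 : rPred c = false := by
        rw [hr]; simp only [decide_eq_false_iff_not]; omega
      have e3 : gPred c = false := by
        rw [hg]; simp only [decide_eq_false_iff_not]; omega
      have e4 : bPred c = true := by rw [hb]; simp only [decide_eq_true_eq]; omega
      rw [ih]; simp [e1, e2, e3, e4]
    · have e1 : pPred c = false := by
        rw [hp]; simp only [decide_eq_false_iff_not]; exact h1
      have e2 : rPred c = false := by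
        rw [hr]; simp only [decide_eq_false_iff_not]
        rintro ⟨x, y, _⟩; exact h2 ⟨x, y⟩
      have e3 : gPred c = false := by
        rw [hg]; simp only [decide_eq_false_iff_not]; exact h3
      have e4 : bPred c = false := by
        rw [hb]; simp only [decide_eq_false_iff_not]; exact h4
      rw [ih]; simp [e1, e2, e3, e4]

-- ===== VERDICT (by name: the statement is the Claim_ definition above) =====
theorem detect_color_spec : Claim_equal_detect_color := by
  intro h _ _
  unfold Spec_detect_color detect_color detect_color_alt
  rw [aLoop_eq]
  simp
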